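-- pv_equiv track=rewrite | github.com/ericmerle3789/Collatz-Junction-Theorem | scripts/research/r58_base_lite.py | compute_Nr_delta
-- ===== SOURCE A (Python) =====
-- from collections import Counter
--
-- def compute_Nr_delta(M, g, p, ord2, dlog_table):
--     """Compute N_r for all r via delta-reformulation.
--     For each delta in [0,M]:
--       c_delta = (1 + g*2^delta) mod p
--       If c_delta = 0: all a in [0, M-delta] contribute to r=0
--       If c_delta != 0: for each a in [0, M-delta], r = 2^a * c_delta mod p
--     """
--     Nr = Counter()
--     for delta in range(M + 1):
--         c_d = (1 + g * pow(2, delta, p)) % p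
--         if c_d == 0:
--             Nr[0] += (M - delta + 1)
--         else:
--             for a in range(M - delta + 1):
--                 r = (pow(2, a, p) * c_d) % p
--                 Nr[r] += 1
--     return Nr
-- ===== SOURCE B (Python) =====
-- from collections import Counter
--
-- def compute_Nr_delta(M, g, p, ord2, dlog_table):
--     """Sliding-window multiset of powers of 2 mod p: precompute x_a = 2^a mod p,
--     keep a Counter of the current window x_0..x_{M-delta}, and for each delta add
--     each DISTINCT power once with its multiplicity (Nr[x*c % p] += m), instead of
--     walking every exponent a.  Since the powers of 2 mod p are eventually periodic,
--     the window holds only O(preperiod + period) distinct values."""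
--     Nr = Counter()
--     if M < 0:
--         return Nr
--     xs = [1 % p]
--     for _ in range(M):
--         xs.append(2 * xs[-1] % p)
--     cnt = Counter(xs)          # multiplicities of the distinct powers in the window
--     pd = 1 % p                 # 2^delta mod p
--     for delta in range(M + 1):
--         c = (1 + g * pd) % p
--         for x, m in cnt.items():
--             Nr[x * c % p] += m
--         last = xs[M - delta]   # shrink the window by its last element
--         cnt[last] -= 1
--         if cnt[last] == 0:
--             del cnt[last]
--         pd = 2 * pd % p
--     return Nr
-- ===== Notes on version B (the rewrite author's own statement) =====
-- stated objective: faster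
-- what changed: B replaces A's inner scan over every exponent a by a sliding-window multiset: it precomputes the powers 2^a mod p once, keeps a Counter of the current window of powers (shrunk by one element per delta), and per delta adds each DISTINCT power once with its multiplicity (Nr[x*c%p] += m), so the inner loop runs over the O(preperiod+period) distinct powers instead of over all M-delta+1 exponents and no per-element pow() is performed.
import Mathlib
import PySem

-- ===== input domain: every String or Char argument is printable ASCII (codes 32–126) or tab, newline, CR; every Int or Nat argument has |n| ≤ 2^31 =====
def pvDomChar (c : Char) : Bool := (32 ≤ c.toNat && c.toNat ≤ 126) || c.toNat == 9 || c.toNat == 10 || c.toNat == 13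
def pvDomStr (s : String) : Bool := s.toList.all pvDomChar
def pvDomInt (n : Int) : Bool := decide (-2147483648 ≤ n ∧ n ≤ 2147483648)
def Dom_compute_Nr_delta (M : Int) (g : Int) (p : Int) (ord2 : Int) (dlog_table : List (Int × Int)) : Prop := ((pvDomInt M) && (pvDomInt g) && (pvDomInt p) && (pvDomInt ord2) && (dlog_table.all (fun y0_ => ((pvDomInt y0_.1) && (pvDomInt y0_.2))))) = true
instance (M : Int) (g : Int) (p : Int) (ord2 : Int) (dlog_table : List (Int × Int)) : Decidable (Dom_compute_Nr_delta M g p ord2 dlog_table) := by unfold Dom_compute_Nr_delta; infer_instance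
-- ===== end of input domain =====

-- B replaces A's inner scan over every exponent by a sliding-window Counter of the
-- distinct powers of 2 mod p, adding each distinct power once with its multiplicity.

-- ===== PORT A =====
def compute_Nr_delta (M : Int) (g : Int) (p : Int) (ord2 : Int) (dlog_table : List (Int × Int)) : List (Int × Int) :=
  let Nr : PySem.Dict Int Int :=
    (PySem.List.pyRange 0 (M + 1) 1).foldl
      (fun Nr delta =>
        let c_d := PySem.Int.mod (1 + g * PySem.Int.powMod 2 delta.toNat p) p
        if c_d = 0 then
          Nr.modify 0 0 (· + (M - delta + 1))
        else
          (PySem.List.pyRange 0 (M - delta + 1) 1).foldl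
            (fun Nr a => Nr.modify (PySem.Int.mod (PySem.Int.powMod 2 a.toNat p * c_d) p) 0 (· + 1))
            Nr)
      PySem.Dict.empty
  Nr.items

-- ===== PORT B =====
def compute_Nr_delta_alt (M : Int) (g : Int) (p : Int) (ord2 : Int) (dlog_table : List (Int × Int)) : List (Int × Int) :=
  if M < 0 then (PySem.Dict.empty : PySem.Dict Int Int).items
  else
    let x0 := PySem.Int.mod 1 p
    let xs := ((List.range M.toNat).foldl
        (fun (st : List Int × Int) _ => (st.1 ++ [PySem.Int.mod (2 * st.2) p], PySem.Int.mod (2 * st.2) p))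
        ([x0], x0)).1
    let fin := (PySem.List.pyRange 0 (M + 1) 1).foldl
      (fun (st : PySem.Dict Int Int × PySem.Dict Int Int × Int) delta =>
        let c := PySem.Int.mod (1 + g * st.2.2) p
        let Nr' := st.2.1.items.foldl
          (fun Nr xm => Nr.modify (PySem.Int.mod (xm.1 * c) p) 0 (· + xm.2)) st.1
        let last := (PySem.List.pyGet? xs (M - delta)).getD 0
        let cnt' := st.2.1.modify last 0 (· - 1)
        let cnt'' := if cnt'.getD last 0 = 0 then cnt'.erase last else cnt'
        (Nr', cnt'', PySem.Int.mod (2 * st.2.2) p))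
      (PySem.Dict.empty, PySem.Dict.counter xs, x0)
    fin.1.items

-- ===== PRECONDITION & SPEC =====
-- Python A raises ValueError (pow with modulus 0) iff the loop runs (M ≥ 0) and p = 0; B raises there too.
def Pre_compute_Nr_delta (M : Int) (g : Int) (p : Int) (ord2 : Int) (dlog_table : List (Int × Int)) : Prop := M < 0 ∨ p ≠ 0
instance (M : Int) (g : Int) (p : Int) (ord2 : Int) (dlog_table : List (Int × Int)) : Decidable (Pre_compute_Nr_delta M g p ord2 dlog_table) := by unfold Pre_compute_Nr_delta; infer_instance
def pvWitness_compute_Nr_delta : Int × Int × Int × Int × (List (Int × Int)) := (2, 3, 5, 0, [])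
def Spec_compute_Nr_delta (M : Int) (g : Int) (p : Int) (ord2 : Int) (dlog_table : List (Int × Int)) (out : List (Int × Int)) : Prop := out = compute_Nr_delta_alt M g p ord2 dlog_table
instance (M : Int) (g : Int) (p : Int) (ord2 : Int) (dlog_table : List (Int × Int)) (out : List (Int × Int)) : Decidable (Spec_compute_Nr_delta M g p ord2 dlog_table out) := by unfold Spec_compute_Nr_delta; infer_instance

-- ===== CLAIM (what is proved, stated in full; the proofs are below) =====
def Claim_equal_compute_Nr_delta : Prop := ∀ (M : Int) (g : Int) (p : Int) (ord2 : Int) (dlog_table : List (Int × Int)), Dom_compute_Nr_delta M g p ord2 dlog_table → Pre_compute_Nr_delta M g p ord2 dlog_table → Spec_compute_Nr_delta M g p ord2 dlog_table (compute_Nr_delta M g p ord2 dlog_table)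

-- ===== LEMMAS AND PROOFS =====

-- x_a = 2^a mod p, and the residue map of one delta-row
def pvX (p : Int) (a : Nat) : Int := PySem.Int.mod ((2 : Int) ^ a) p
def pvF (c p x : Int) : Int := PySem.Int.mod (x * c) p

-- the loop bodies of the two ports, named for the proofs
def pvAStep (M g p : Int) (Nr : PySem.Dict Int Int) (delta : Int) : PySem.Dict Int Int :=
  let c_d := PySem.Int.mod (1 + g * PySem.Int.powMod 2 delta.toNat p) p
  if c_d = 0 then
    Nr.modify 0 0 (· + (M - delta + 1))
  else
    (PySem.List.pyRange 0 (M - delta + 1) 1).foldl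
      (fun Nr a => Nr.modify (PySem.Int.mod (PySem.Int.powMod 2 a.toNat p * c_d) p) 0 (· + 1))
      Nr

def pvBStep (M g p : Int) (xs : List Int) (st : PySem.Dict Int Int × PySem.Dict Int Int × Int) (delta : Int) : PySem.Dict Int Int × PySem.Dict Int Int × Int :=
  let c := PySem.Int.mod (1 + g * st.2.2) p
  let Nr' := st.2.1.items.foldl
    (fun Nr xm => Nr.modify (PySem.Int.mod (xm.1 * c) p) 0 (· + xm.2)) st.1
  let last := (PySem.List.pyGet? xs (M - delta)).getD 0
  let cnt' := st.2.1.modify last 0 (· - 1)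
  let cnt'' := if cnt'.getD last 0 = 0 then cnt'.erase last else cnt'
  (Nr', cnt'', PySem.Int.mod (2 * st.2.2) p)

-- (fmod arithmetic) reducing a factor mod p does not change a product mod p
theorem pvFmodMulLeft (a b p : Int) : ((a.fmod p) * b).fmod p = (a * b).fmod p := by
  conv_lhs => rw [Int.fmod_def a p]
  have h : (a - p * a.fdiv p) * b = a * b - (a.fdiv p * b) * p := by ring
  rw [h, Int.sub_mul_fmod_self_right]

theorem pvFmodMulRight (a b p : Int) : (a * (b.fmod p)).fmod p = (a * b).fmod p := by
  rw [mul_comm, pvFmodMulLeft, mul_comm]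

theorem pvModDouble (x p : Int) : PySem.Int.mod (2 * PySem.Int.mod x p) p = PySem.Int.mod (2 * x) p := by
  simp only [PySem.Int.mod]
  rw [pvFmodMulRight]

theorem pvXSucc (p : Int) (j : Nat) : PySem.Int.mod (2 * pvX p j) p = pvX p (j + 1) := by
  unfold pvX
  rw [pvModDouble]
  congr 1
  rw [pow_succ]
  ring

-- two modifies at the same key fuse
theorem pvModifyModify (d : PySem.Dict Int Int) (k : Int) (f g : Int → Int) :
    (d.modify k 0 f).modify k 0 g = d.modify k 0 (fun v => g (f v)) := by
  simp only [PySem.Dict.modify, PySem.Dict.getD_insert_self, PySem.Dict.insert_insert_self]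

-- re-inserting the stored value changes nothing
theorem pvInsertGetD (d : PySem.Dict Int Int) (k : Int) (hnd : d.keys.Nodup) (hc : d.contains k = true) :
    d.insert k (d.getD k 0) = d := by
  apply PySem.Dict.ext
  rw [PySem.Dict.items_insert_of_contains d _ hc]
  conv_rhs => rw [← List.map_id d.items]
  apply List.map_congr_left
  intro q hq
  by_cases h : (q.1 == k) = true
  · have hk : q.1 = k := by simpa using h
    have hv : d.getD q.1 0 = q.2 := PySem.Dict.getD_of_mem_items d (by simpa using hq) hnd 0
    simp [← hk, hv]
  · simp [h]

-- erasing a freshly appended key restores the dict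
theorem pvEraseInsert (d : PySem.Dict Int Int) (k : Int) (v : Int) (hc : d.contains k = false) :
    (d.insert k v).erase k = d := by
  apply PySem.Dict.ext
  show ((d.insert k v).erase k).items = d.items
  rw [show ∀ (e : PySem.Dict Int Int), (e.erase k).items = e.items.filter (fun q => !(q.1 == k)) from fun e => rfl,
      PySem.Dict.items_insert_of_not_contains d v hc, List.filter_append]
  have hmem : ∀ q ∈ d.items, (!(q.1 == k)) = true := by
    intro q hq
    have : q.1 ∈ d.keys := by
      simp only [PySem.Dict.keys]
      exact List.mem_map_of_mem hq
    have hne : q.1 ≠ k := by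
      intro he
      exact absurd ((PySem.Dict.contains_iff_mem_keys d k).mpr (he ▸ this)) (by simp [hc])
    simp [hne]
  rw [List.filter_eq_self.mpr hmem]
  simp

-- the shrink-by-one step on the window counter
theorem pvShrink (ys : List Int) (x : Int) :
    (if ((PySem.Dict.counter (ys ++ [x])).modify x 0 (· - 1)).getD x 0 = 0
     then ((PySem.Dict.counter (ys ++ [x])).modify x 0 (· - 1)).erase x
     else (PySem.Dict.counter (ys ++ [x])).modify x 0 (· - 1))
      = PySem.Dict.counter ys := by
  have hfuse : (PySem.Dict.counter (ys ++ [x])).modify x 0 (· - 1)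
      = (PySem.Dict.counter ys).modify x 0 (fun v => v) := by
    rw [PySem.Dict.counter_append_singleton, pvModifyModify]
    congr 1
    funext v
    ring
  rw [hfuse]
  have hgd : ((PySem.Dict.counter ys).modify x 0 (fun v => v)).getD x 0 = (ys.count x : Int) := by
    rw [PySem.Dict.getD_modify_self, PySem.Dict.getD_counter]
  by_cases hx : x ∈ ys
  · have hpos : (ys.count x : Int) ≠ 0 := by
      have := List.count_pos_iff.mpr hx
      omega
    rw [if_neg (by rw [hgd]; exact hpos)]
    show (PySem.Dict.counter ys).insert x ((PySem.Dict.counter ys).getD x 0) = PySem.Dict.counter ys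
    exact pvInsertGetD _ x (PySem.Dict.nodup_keys_counter ys)
      (by rw [PySem.Dict.contains_counter]; simpa using hx)
  · have hc0 : (PySem.Dict.counter ys).contains x = false := by
      rw [PySem.Dict.contains_counter]; simpa using hx
    have hcnt : (ys.count x : Int) = 0 := by
      simp [List.count_eq_zero.mpr hx]
    rw [if_pos (by rw [hgd]; exact hcnt)]
    show (((PySem.Dict.counter ys).insert x ((PySem.Dict.counter ys).getD x 0)).erase x) = PySem.Dict.counter ys
    exact pvEraseInsert _ x _ hc0

-- sum of the indicator over a Nodup list
theorem pvSumIte (x : Int) (T : List Int) (h : T.Nodup) :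
    (T.map (fun y => if x = y then (1 : Int) else 0)).sum = if x ∈ T then 1 else 0 := by
  induction T with
  | nil => simp
  | cons a t ih =>
      have hnd := h
      rw [List.nodup_cons] at hnd
      by_cases hxa : x = a
      · subst hxa
        simp [List.map_cons, ih hnd.2, hnd.1]
      · simp [List.map_cons, ih hnd.2, hxa]

-- multiplicity-weighted sum over the distinct elements = count in the image list
theorem pvW (f : Int → Int) (k : Int) (L : List Int) :
    (((PySem.Set.ofList L).filter (fun x => f x == k)).map (fun x => (L.count x : Int))).sum
      = ((L.map f).count k : Int) := by
  induction L using List.reverseRecOn with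
  | nil => simp [PySem.Set.ofList_nil]
  | append_singleton L x ih =>
      rw [PySem.Set.ofList_append_singleton]
      have hcnt : ∀ y, ((L ++ [x]).count y : Int) = (L.count y : Int) + (if x = y then 1 else 0) := by
        intro y
        rw [List.count_append, List.count_singleton]
        by_cases h : x = y
        · simp [h]
        · simp [h]
      have hrhs : (((L ++ [x]).map f).count k : Int)
          = ((L.map f).count k : Int) + (if f x == k then 1 else 0) := by
        rw [List.map_append, List.count_append, List.map_singleton, List.count_singleton]
        by_cases h : (f x == k) = true
        · simp [h]
        · simp [h]
      by_cases hx : x ∈ PySem.Set.ofList L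
      · rw [PySem.Set.add_of_mem hx, hrhs, ← ih]
        have hcong : ((PySem.Set.ofList L).filter (fun x => f x == k)).map (fun y => ((L ++ [x]).count y : Int))
            = ((PySem.Set.ofList L).filter (fun x => f x == k)).map
                (fun y => (L.count y : Int) + (if x = y then 1 else 0)) :=
          List.map_congr_left (fun y _ => hcnt y)
        rw [hcong, PySem.List.sum_map_add_int, pvSumIte x _ ((PySem.Set.nodup_ofList L).filter _)]
        have hmemiff : x ∈ (PySem.Set.ofList L).filter (fun x => f x == k) ↔ (f x == k) = true := by
          rw [List.mem_filter]
          exact ⟨fun h => h.2, fun h => ⟨hx, h⟩⟩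
        by_cases hk : (f x == k) = true
        · simp [hmemiff, hk]
        · simp [hmemiff, hk]
      · rw [PySem.Set.add_of_not_mem hx, List.filter_append, List.map_append, List.sum_append, hrhs, ← ih]
        have hxL : x ∉ L := fun h => hx ((PySem.Set.mem_ofList L x).mpr h)
        have hcong : ((PySem.Set.ofList L).filter (fun x => f x == k)).map (fun y => ((L ++ [x]).count y : Int))
            = ((PySem.Set.ofList L).filter (fun x => f x == k)).map (fun y => (L.count y : Int)) := by
          apply List.map_congr_left
          intro y hy
          have hyL : y ∈ L := (PySem.Set.mem_ofList L y).mp (List.mem_of_mem_filter hy)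
          rw [hcnt y, if_neg (fun he => hxL (by rw [he]; exact hyL))]
          ring
        rw [hcong]
        have hx1 : ((L ++ [x]).count x : Int) = 1 := by
          rw [hcnt x, if_pos rfl, Nat.cast_eq_zero.mpr (List.count_eq_zero.mpr hxL)]
          ring
        by_cases hk : (f x == k) = true
        · simp [hk, hx1, List.count_eq_zero.mpr hxL]
        · simp [hk]

-- value of the batched fold
theorem pvV (f : Int → Int) (ps : List (Int × Int)) (d : PySem.Dict Int Int) (k : Int) :
    (ps.foldl (fun d xm => d.modify (f xm.1) 0 (· + xm.2)) d).getD k 0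
      = d.getD k 0 + ((ps.filter (fun xm => f xm.1 == k)).map (·.2)).sum := by
  induction ps generalizing d with
  | nil => simp
  | cons q t ih =>
      rw [List.foldl_cons, ih]
      by_cases h : k = f q.1
      · have hb : (f q.1 == k) = true := by simp [h]
        rw [PySem.Dict.getD_modify]
        rw [if_pos h, h]
        simp [List.filter_cons, hb]
        ring
      · have hb : (f q.1 == k) = false := by simp [Ne.symm h]
        rw [PySem.Dict.getD_modify]
        rw [if_neg h]
        simp [hb]

-- dedup before update does not change the resulting key set (in order)
theorem pvU (f : Int → Int) (L : List Int) (ks : PySem.Set Int) :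
    PySem.Set.update ks ((PySem.Set.ofList L).map f) = PySem.Set.update ks (L.map f) := by
  induction L using List.reverseRecOn generalizing ks with
  | nil => simp [PySem.Set.ofList_nil]
  | append_singleton L x ih =>
      rw [PySem.Set.ofList_append_singleton, List.map_append, PySem.Set.update_append,
          List.map_singleton, PySem.Set.update_cons, PySem.Set.update_nil]
      by_cases hx : x ∈ PySem.Set.ofList L
      · rw [PySem.Set.add_of_mem hx, ih]
        have : f x ∈ PySem.Set.update ks (L.map f) := by
          rw [PySem.Set.mem_update]
          exact Or.inr (List.mem_map_of_mem ((PySem.Set.mem_ofList L x).mp hx))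
        rw [PySem.Set.add_of_mem this]
      · rw [PySem.Set.add_of_not_mem hx, List.map_append, PySem.Set.update_append,
            List.map_singleton, PySem.Set.update_cons, PySem.Set.update_nil, ih]

-- THE HEART: counting elements one by one equals one batched add per distinct element
theorem pvBatchEq (f : Int → Int) (L : List Int) (d : PySem.Dict Int Int) (hnd : d.keys.Nodup) :
    L.foldl (fun d x => d.modify (f x) 0 (· + 1)) d
      = (PySem.Dict.counter L).items.foldl (fun d xm => d.modify (f xm.1) 0 (· + xm.2)) d := by
  have hkE : (L.foldl (fun d x => d.modify (f x) 0 (· + 1)) d).keys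
      = PySem.Set.update d.keys (L.map f) :=
    PySem.Dict.keys_foldl_modify_key L f 0 (fun _ _ => (· + 1)) d
  have hkB : ((PySem.Dict.counter L).items.foldl (fun d xm => d.modify (f xm.1) 0 (· + xm.2)) d).keys
      = PySem.Set.update d.keys (L.map f) := by
    rw [PySem.Dict.keys_foldl_modify_key (PySem.Dict.counter L).items (fun xm => f xm.1) 0
          (fun (_ : PySem.Dict Int Int) (xm : Int × Int) => (· + xm.2)) d, PySem.Dict.items_counter, List.map_map]
    exact pvU f L d.keys
  have hnE : (L.foldl (fun d x => d.modify (f x) 0 (· + 1)) d).keys.Nodup :=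
    PySem.Dict.nodup_keys_foldl_modify_key L f 0 (fun _ _ => (· + 1)) d hnd
  have hnB : ((PySem.Dict.counter L).items.foldl (fun d xm => d.modify (f xm.1) 0 (· + xm.2)) d).keys.Nodup :=
    PySem.Dict.nodup_keys_foldl_modify_key _ (fun xm => f xm.1) 0 (fun (_ : PySem.Dict Int Int) (xm : Int × Int) => (· + xm.2)) d hnd
  have hgd : ∀ k, (L.foldl (fun d x => d.modify (f x) 0 (· + 1)) d).getD k 0
      = ((PySem.Dict.counter L).items.foldl (fun d xm => d.modify (f xm.1) 0 (· + xm.2)) d).getD k 0 := by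
    intro k
    have hfm : L.foldl (fun d x => d.modify (f x) 0 (· + 1)) d
        = (L.map f).foldl (fun d y => d.modify y 0 (· + 1)) d :=
      (List.foldl_map (f := f) (g := fun d y => d.modify y 0 (· + 1)) (l := L) (init := d)).symm
    rw [pvV, hfm, PySem.Dict.getD_foldl_modify_add_one]
    congr 1
    rw [PySem.Dict.items_counter, List.filter_map, List.map_map, ← pvW f k L]
    rfl
  apply PySem.Dict.ext
  rw [PySem.Dict.items_eq_map_keys _ hnE 0, PySem.Dict.items_eq_map_keys _ hnB 0, hkE, hkB]
  apply List.map_congr_left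
  intro k _
  rw [hgd k]

-- batched fold when every key collapses to 0 (the c = 0 row)
theorem pvConstFold (q : Int × Int) (t : List (Int × Int)) (d : PySem.Dict Int Int) :
    (q :: t).foldl (fun d xm => d.modify 0 0 (· + xm.2)) d
      = d.modify 0 0 (· + ((q :: t).map (·.2)).sum) := by
  induction t generalizing d q with
  | nil =>
      simp only [List.foldl_cons, List.foldl_nil, List.map_cons, List.map_nil, List.sum_cons,
        List.sum_nil]
      congr 1
      funext v
      ring
  | cons r t ih =>
      rw [List.foldl_cons, ih, pvModifyModify]
      congr 1
      funext v
      simp only [List.map_cons, List.sum_cons]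
      ring

-- the power-list builder of B
theorem pvBuild (p : Int) (m : Nat) :
    (List.range m).foldl
        (fun (st : List Int × Int) _ => (st.1 ++ [PySem.Int.mod (2 * st.2) p], PySem.Int.mod (2 * st.2) p))
        ([PySem.Int.mod 1 p], PySem.Int.mod 1 p)
      = ((List.range (m + 1)).map (pvX p), pvX p m) := by
  induction m with
  | zero => simp [pvX]
  | succ m ih =>
      rw [List.range_succ, List.foldl_append, ih, List.foldl_cons, List.foldl_nil]
      rw [show List.range (m + 1 + 1) = List.range (m + 1) ++ [m + 1] from List.range_succ]
      rw [List.map_append, List.map_singleton]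
      exact Prod.ext (by rw [pvXSucc]) (by rw [pvXSucc])

-- one iteration of the two loops agree (and the invariant advances)
theorem pvStep (M g p : Int) (hM : 0 ≤ M) (j : Nat) (hj : j ≤ M.toNat)
    (Nr : PySem.Dict Int Int) (hNd : Nr.keys.Nodup) :
    pvBStep M g p ((List.range (M.toNat + 1)).map (pvX p))
        (Nr, PySem.Dict.counter ((List.range (M.toNat + 1 - j)).map (pvX p)), pvX p j) ((j : Int))
      = (pvAStep M g p Nr ((j : Int)),
         PySem.Dict.counter ((List.range (M.toNat - j)).map (pvX p)), pvX p (j + 1))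
    ∧ (pvAStep M g p Nr ((j : Int))).keys.Nodup := by
  have hn : M.toNat + 1 - j = (M.toNat - j) + 1 := by omega
  have hW : (List.range (M.toNat + 1 - j)).map (pvX p)
      = (List.range (M.toNat - j)).map (pvX p) ++ [pvX p (M.toNat - j)] := by
    rw [hn, List.range_succ, List.map_append, List.map_singleton]
  have hlast : (PySem.List.pyGet? ((List.range (M.toNat + 1)).map (pvX p)) (M - (j : Int))).getD 0
      = pvX p (M.toNat - j) := by
    have hidx : M - (j : Int) = ((M.toNat - j : Nat) : Int) := by omega
    have hlt : M.toNat - j < M.toNat + 1 := by omega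
    rw [hidx, PySem.List.pyGet?_natCast]
    simp [hlt]
  have hrange : PySem.List.pyRange 0 (M - (j : Int) + 1) 1
      = (List.range (M.toNat + 1 - j)).map (fun k : Nat => (k : Int)) := by
    rw [show M - (j : Int) + 1 = ((M.toNat + 1 - j : Nat) : Int) by omega, ← PySem.List.pyRange_zero_nat]
  -- A's row fold, rewritten as a fold over the window of powers
  have hAfold : ∀ c : Int,
      (PySem.List.pyRange 0 (M - (j : Int) + 1) 1).foldl
          (fun d a => d.modify (PySem.Int.mod (PySem.Int.powMod 2 a.toNat p * c) p) 0 (· + 1)) Nr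
        = ((List.range (M.toNat + 1 - j)).map (pvX p)).foldl
            (fun d y => d.modify (PySem.Int.mod (y * c) p) 0 (· + 1)) Nr := by
    intro c
    rw [hrange]
    rw [List.foldl_map (f := fun k : Nat => (k : Int))
        (g := fun (d : PySem.Dict Int Int) (a : Int) => d.modify (PySem.Int.mod (PySem.Int.powMod 2 a.toNat p * c) p) 0 (· + 1))]
    rw [List.foldl_map (f := pvX p)
        (g := fun (d : PySem.Dict Int Int) (y : Int) => d.modify (PySem.Int.mod (y * c) p) 0 (· + 1))]
    apply PySem.List.foldl_congr_mem
    intro acc a _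
    have h1 : ((a : Int)).toNat = a := Int.toNat_natCast a
    rw [h1]
    rfl
  have hA : pvAStep M g p Nr ((j : Int))
      = if PySem.Int.mod (1 + g * pvX p j) p = 0 then
          Nr.modify 0 0 (· + (M - (j : Int) + 1))
        else
          ((List.range (M.toNat + 1 - j)).map (pvX p)).foldl
            (fun d y => d.modify (PySem.Int.mod (y * (PySem.Int.mod (1 + g * pvX p j) p)) p) 0 (· + 1)) Nr := by
    show (if PySem.Int.mod (1 + g * PySem.Int.powMod 2 ((j : Int)).toNat p) p = 0 then _ else _) = _
    rw [Int.toNat_natCast j]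
    show (if PySem.Int.mod (1 + g * pvX p j) p = 0 then _ else _) = _
    by_cases h0 : PySem.Int.mod (1 + g * pvX p j) p = 0
    · rw [if_pos h0, if_pos h0]
    · rw [if_neg h0, if_neg h0]
      exact hAfold _
  -- the multiplicities in the window counter sum to the window length
  have hsum : ∀ (W : List Int), ((PySem.Dict.counter W).items.map (·.2)).sum = (W.length : Int) := by
    intro W
    rw [PySem.Dict.items_counter, List.map_map]
    have hpw := pvW (fun _ => (0 : Int)) 0 W
    simp only [List.filter_true, beq_self_eq_true] at hpw
    rw [show ((fun q : Int × Int => q.2) ∘ fun k => (k, (W.count k : Int))) = fun k => (W.count k : Int) from rfl]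
    rw [hpw, List.map_const', List.count_replicate]
    simp
  refine ⟨?_, ?_⟩
  · -- the full tuple
    refine Prod.ext ?_ (Prod.ext ?_ ?_)
    · -- Nr component
      show ((PySem.Dict.counter ((List.range (M.toNat + 1 - j)).map (pvX p))).items.foldl
          (fun Nr xm => Nr.modify (PySem.Int.mod (xm.1 * (PySem.Int.mod (1 + g * pvX p j) p)) p) 0 (· + xm.2)) Nr)
        = pvAStep M g p Nr ((j : Int))
      rw [hA]
      by_cases h0 : PySem.Int.mod (1 + g * pvX p j) p = 0
      · rw [if_pos h0, h0]
        have hne : (PySem.Dict.counter ((List.range (M.toNat + 1 - j)).map (pvX p))).items ≠ [] := by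
          rw [PySem.Dict.items_counter]
          intro he
          have : pvX p (M.toNat - j) ∈ (PySem.Set.ofList ((List.range (M.toNat + 1 - j)).map (pvX p))) := by
            rw [PySem.Set.mem_ofList, hW]
            exact List.mem_append_right _ (List.mem_singleton_self _)
          rw [List.map_eq_nil_iff.mp he] at this
          exact absurd this (List.not_mem_nil)
        obtain ⟨q, t, hqt⟩ := List.exists_cons_of_ne_nil hne
        have hcongr : (q :: t).foldl
            (fun Nr xm => Nr.modify (PySem.Int.mod (xm.1 * 0) p) 0 (· + xm.2)) Nr
            = (q :: t).foldl (fun Nr xm => Nr.modify 0 0 (· + xm.2)) Nr := by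
          apply PySem.List.foldl_congr_mem
          intro acc xm _
          rw [show PySem.Int.mod (xm.1 * 0) p = 0 by simp [PySem.Int.mod, Int.zero_fmod]]
        rw [hqt, hcongr, pvConstFold]
        have hlen := hsum ((List.range (M.toNat + 1 - j)).map (pvX p))
        rw [hqt] at hlen
        rw [hlen]
        congr 1
        funext v
        have : (((List.range (M.toNat + 1 - j)).map (pvX p)).length : Int) = M - (j : Int) + 1 := by
          rw [List.length_map, List.length_range]
          omega
        rw [this]
      · rw [if_neg h0]
        exact (pvBatchEq (fun y => PySem.Int.mod (y * (PySem.Int.mod (1 + g * pvX p j) p)) p)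
          ((List.range (M.toNat + 1 - j)).map (pvX p)) Nr hNd).symm
    · -- counter component
      show (if ((PySem.Dict.counter ((List.range (M.toNat + 1 - j)).map (pvX p))).modify
              ((PySem.List.pyGet? ((List.range (M.toNat + 1)).map (pvX p)) (M - (j : Int))).getD 0) 0 (· - 1)).getD
              ((PySem.List.pyGet? ((List.range (M.toNat + 1)).map (pvX p)) (M - (j : Int))).getD 0) 0 = 0
            then ((PySem.Dict.counter ((List.range (M.toNat + 1 - j)).map (pvX p))).modify
              ((PySem.List.pyGet? ((List.range (M.toNat + 1)).map (pvX p)) (M - (j : Int))).getD 0) 0 (· - 1)).erase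
              ((PySem.List.pyGet? ((List.range (M.toNat + 1)).map (pvX p)) (M - (j : Int))).getD 0)
            else (PySem.Dict.counter ((List.range (M.toNat + 1 - j)).map (pvX p))).modify
              ((PySem.List.pyGet? ((List.range (M.toNat + 1)).map (pvX p)) (M - (j : Int))).getD 0) 0 (· - 1))
          = PySem.Dict.counter ((List.range (M.toNat - j)).map (pvX p))
      rw [hlast, hW]
      exact pvShrink _ _
    · -- power-of-two component
      show PySem.Int.mod (2 * pvX p j) p = pvX p (j + 1)
      exact pvXSucc p j
  · -- Nodup is preserved
    rw [hA]
    by_cases h0 : PySem.Int.mod (1 + g * pvX p j) p = 0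
    · rw [if_pos h0]
      exact PySem.Dict.nodup_keys_insert Nr 0 _ hNd
    · rw [if_neg h0]
      exact PySem.Dict.nodup_keys_foldl_modify_key _
        (fun y => PySem.Int.mod (y * (PySem.Int.mod (1 + g * pvX p j) p)) p) 0
        (fun _ _ => (· + 1)) Nr hNd

-- the main loops agree on every prefix
theorem pvLoop (M g p : Int) (hM : 0 ≤ M) : ∀ (j : Nat), j ≤ M.toNat + 1 →
    (((List.range j).map (fun k : Nat => (k : Int))).foldl
        (pvBStep M g p ((List.range (M.toNat + 1)).map (pvX p)))
        (PySem.Dict.empty, PySem.Dict.counter ((List.range (M.toNat + 1)).map (pvX p)), PySem.Int.mod 1 p)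
      = (((List.range j).map (fun k : Nat => (k : Int))).foldl (pvAStep M g p) PySem.Dict.empty,
         PySem.Dict.counter ((List.range (M.toNat + 1 - j)).map (pvX p)), pvX p j))
    ∧ (((List.range j).map (fun k : Nat => (k : Int))).foldl (pvAStep M g p) PySem.Dict.empty).keys.Nodup := by
  intro j
  induction j with
  | zero =>
      intro _
      refine ⟨?_, by simp [PySem.Dict.keys_empty]⟩
      simp only [List.range_zero, List.map_nil, List.foldl_nil, Nat.sub_zero]
      exact Prod.ext rfl (Prod.ext rfl (by simp [pvX]))
  | succ j ih =>
      intro hj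
      have hj' : j ≤ M.toNat + 1 := by omega
      have hjM : j ≤ M.toNat := by omega
      obtain ⟨hB, hNd⟩ := ih hj'
      have hstep := pvStep M g p hM j hjM _ hNd
      rw [show List.range (j + 1) = List.range j ++ [j] from List.range_succ]
      rw [List.map_append, List.map_singleton, List.foldl_append, List.foldl_append,
          List.foldl_cons, List.foldl_cons, List.foldl_nil, List.foldl_nil]
      rw [hB]
      refine ⟨?_, hstep.2⟩
      rw [hstep.1]
      have : M.toNat + 1 - (j + 1) = M.toNat - j := by omega
      rw [this]

-- ===== VERDICT helper =====
theorem compute_Nr_delta_spec : Claim_equal_compute_Nr_delta := by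
  intro M g p ord2 dlog_table _ _
  unfold Spec_compute_Nr_delta compute_Nr_delta compute_Nr_delta_alt
  by_cases hM : M < 0
  · rw [if_pos hM]
    have hnil : PySem.List.pyRange 0 (M + 1) 1 = [] := by
      apply PySem.List.pyRange_one_eq_nil
      omega
    show (List.foldl (pvAStep M g p) PySem.Dict.empty (PySem.List.pyRange 0 (M + 1) 1)).items
        = (PySem.Dict.empty : PySem.Dict Int Int).items
    rw [hnil, List.foldl_nil]
  · rw [if_neg hM]
    have hM' : 0 ≤ M := by omega
    have hxs : ((List.range M.toNat).foldl
        (fun (st : List Int × Int) _ => (st.1 ++ [PySem.Int.mod (2 * st.2) p], PySem.Int.mod (2 * st.2) p))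
        ([PySem.Int.mod 1 p], PySem.Int.mod 1 p)).1 = (List.range (M.toNat + 1)).map (pvX p) := by
      rw [pvBuild]
    have hrange : PySem.List.pyRange 0 (M + 1) 1
        = (List.range (M.toNat + 1)).map (fun k : Nat => (k : Int)) := by
      rw [show M + 1 = ((M.toNat + 1 : Nat) : Int) by omega, ← PySem.List.pyRange_zero_nat]
    obtain ⟨hB, _⟩ := pvLoop M g p hM' (M.toNat + 1) (le_refl _)
    show (List.foldl (pvAStep M g p) PySem.Dict.empty (PySem.List.pyRange 0 (M + 1) 1)).items
        = ((List.foldl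
            (pvBStep M g p (((List.range M.toNat).foldl
              (fun (st : List Int × Int) _ => (st.1 ++ [PySem.Int.mod (2 * st.2) p], PySem.Int.mod (2 * st.2) p))
              ([PySem.Int.mod 1 p], PySem.Int.mod 1 p)).1))
            (PySem.Dict.empty,
             PySem.Dict.counter (((List.range M.toNat).foldl
              (fun (st : List Int × Int) _ => (st.1 ++ [PySem.Int.mod (2 * st.2) p], PySem.Int.mod (2 * st.2) p))
              ([PySem.Int.mod 1 p], PySem.Int.mod 1 p)).1),
             PySem.Int.mod 1 p)
            (PySem.List.pyRange 0 (M + 1) 1)).1).items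
    rw [hxs, hrange, hB]
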